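-- pv_equiv track=rewrite | github.com/codesrepo/aimo3-training-pipeline | preprocess_training_samples_multi.py | synthetic_rejected_answer
-- ===== SOURCE A (Python) =====
-- from typing import Any, Dict, List, Optional, Set, Tuple
--
-- def _expected_to_int(expected: Any) -> Optional[int]:
--     if expected is None:
--         return None
--     try:
--         s = str(expected).strip().replace(",", "")
--         return int(s) if s else None
--     except ValueError:
--         return None
--
-- def synthetic_rejected_answer(expected: Any) -> Optional[str]:
--     n = _expected_to_int(expected)
--     if n is None:
--         return None
--     cands = [
--         n + 1,
--         max(0, n - 1),
--         2 * n,
--         max(1, n // 2) if n else 1,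
--     ]
--     for c in cands:
--         if c != n and c >= 0:
--             return str(int(c))
--     return str(n + 1)
-- ===== SOURCE B (Python) =====
-- from typing import Any, Optional
--
-- def _expected_to_int(expected: Any) -> Optional[int]:
--     if expected is None:
--         return None
--     try:
--         s = str(expected).strip().replace(",", "")
--         return int(s) if s else None
--     except ValueError:
--         return None
--
-- def synthetic_rejected_answer(expected: Any) -> Optional[str]:
--     n = _expected_to_int(expected)
--     if n is None:
--         return None
--     return "0" if n <= -2 else str(n + 1)
-- ===== Notes on version B (the rewrite author's own statement) =====
-- stated objective: simpler
-- what changed: Replaced the candidate-list construction and first-match scan with the closed form it always computes: '0' for parsed n <= -2, str(n+1) otherwise; the parsing helper is kept identical.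
import Mathlib
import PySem

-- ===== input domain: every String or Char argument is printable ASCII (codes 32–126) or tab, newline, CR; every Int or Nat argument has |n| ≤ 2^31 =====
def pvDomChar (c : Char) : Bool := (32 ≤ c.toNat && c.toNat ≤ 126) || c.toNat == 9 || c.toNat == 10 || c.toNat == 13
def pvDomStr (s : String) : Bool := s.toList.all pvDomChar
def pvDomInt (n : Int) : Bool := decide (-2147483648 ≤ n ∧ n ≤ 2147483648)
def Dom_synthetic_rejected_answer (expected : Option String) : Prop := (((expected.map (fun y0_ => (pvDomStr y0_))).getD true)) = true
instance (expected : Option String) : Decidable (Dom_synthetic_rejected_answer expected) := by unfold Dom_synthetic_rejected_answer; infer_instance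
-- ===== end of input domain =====

-- B replaces A's candidate-list-and-scan with the closed form it always computes ("0" for n ≤ -2, str(n+1) otherwise); objective: simpler.


-- ===== PORT A =====
-- _expected_to_int: shared verbatim by A and B (both Pythons carry the identical helper)
def pvExpectedToInt (expected : Option String) : Option Int :=
  match expected with
  | none => none
  | some e =>
    -- s = str(expected).strip().replace(",", ""); int(s) if s else None; ValueError → None (ofStr? is none there)
    let s := PySem.Str.replace (PySem.Str.strip e) "," ""
    if s = "" then none else PySem.Int.ofStr? s

-- the for-loop over cands: first c with c != n and c >= 0, else str(n + 1)
def pvScanCands (n : Int) : List Int → String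
  | [] => PySem.Int.toStr (n + 1)
  | c :: rest => if c ≠ n ∧ c ≥ 0 then PySem.Int.toStr c else pvScanCands n rest

def synthetic_rejected_answer (expected : Option String) : Option String :=
  match pvExpectedToInt expected with
  | none => none
  | some n =>
    let cands : List Int :=
      [n + 1, max 0 (n - 1), 2 * n, if n ≠ 0 then max 1 (PySem.Int.floordiv n 2) else 1]
    some (pvScanCands n cands)

-- ===== PORT B =====
def synthetic_rejected_answer_alt (expected : Option String) : Option String :=
  match pvExpectedToInt expected with
  | none => none
  | some n => some (if n ≤ -2 then "0" else PySem.Int.toStr (n + 1))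

-- ===== PRECONDITION & SPEC =====
def Spec_synthetic_rejected_answer (expected : Option String) (out : Option String) : Prop := out = synthetic_rejected_answer_alt expected
instance (expected : Option String) (out : Option String) : Decidable (Spec_synthetic_rejected_answer expected out) := by unfold Spec_synthetic_rejected_answer; infer_instance

-- ===== CLAIM (what is proved, stated in full; the proofs are below) =====
def Claim_equal_synthetic_rejected_answer : Prop := ∀ (expected : Option String), Dom_synthetic_rejected_answer expected → Spec_synthetic_rejected_answer expected (synthetic_rejected_answer expected)

-- ===== LEMMAS AND PROOFS =====
lemma pvScan_eq_closed (n : Int) :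
    pvScanCands n [n + 1, max 0 (n - 1), 2 * n, if n ≠ 0 then max 1 (PySem.Int.floordiv n 2) else 1]
      = if n ≤ -2 then "0" else PySem.Int.toStr (n + 1) := by
  by_cases h : n ≤ -2
  · -- n+1 < 0 fails; max 0 (n-1) = 0, 0 ≠ n, 0 ≥ 0 → "0"
    rw [if_pos h]
    have h1 : ¬ (n + 1 ≠ n ∧ n + 1 ≥ 0) := by omega
    have hm : max (0:Int) (n - 1) = 0 := by omega
    simp only [pvScanCands, if_neg h1, hm]
    have h2 : (0:Int) ≠ n ∧ (0:Int) ≥ 0 := by omega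
    rw [if_pos h2]
    decide
  · rw [if_neg h]
    have h1 : n + 1 ≠ n ∧ n + 1 ≥ 0 := by omega
    simp only [pvScanCands, if_pos h1]

-- ===== VERDICT (by name: the statement is the Claim_ definition above) =====
theorem synthetic_rejected_answer_spec : Claim_equal_synthetic_rejected_answer := by
  intro expected _
  unfold Spec_synthetic_rejected_answer synthetic_rejected_answer synthetic_rejected_answer_alt
  cases pvExpectedToInt expected with
  | none => rfl
  | some n => simp only [pvScan_eq_closed]
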